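-- pv_equiv track=rewrite | github.com/stijn-dejongh/spec-kitty | src/specify_cli/state_contract.py | _collapse_placeholder_pattern
-- ===== SOURCE A (Python) =====
-- def _collapse_placeholder_pattern(pattern: str) -> str | None:
--     """Collapse a path pattern with placeholders to its clean parent directory.
--
--     Returns ``None`` if no clean prefix exists.
--     """
--     parts = pattern.split("/")
--     clean_parts: list[str] = []
--     for part in parts:
--         if "<" in part or "*" in part:
--             break
--         clean_parts.append(part)
--     return "/".join(clean_parts) + "/" if clean_parts else None
-- ===== SOURCE B (Python) =====
-- def _collapse_placeholder_pattern(pattern: str) -> str | None: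
--     """Single pass over the characters: keep the clean directory prefix seen so
--     far (through its trailing '/'); stop at the first placeholder character."""
--     keep = None   # clean prefix through the last '/', or None if no '/' seen yet
--     acc = []      # characters consumed since the last kept '/'
--     for c in pattern:
--         if c in "<*":
--             return keep
--         acc.append(c)
--         if c == "/":
--             keep = (keep or "") + "".join(acc)
--             acc = []
--     return (keep or "") + "".join(acc) + "/"
-- ===== Notes on version B (the rewrite author's own statement) =====
-- stated objective: alternative
-- what changed: Replaced split-on-slash plus segment loop plus join with a single character pass that maintains the clean directory prefix through the last slash and an accumulator for the current segment.
import Mathlib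
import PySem

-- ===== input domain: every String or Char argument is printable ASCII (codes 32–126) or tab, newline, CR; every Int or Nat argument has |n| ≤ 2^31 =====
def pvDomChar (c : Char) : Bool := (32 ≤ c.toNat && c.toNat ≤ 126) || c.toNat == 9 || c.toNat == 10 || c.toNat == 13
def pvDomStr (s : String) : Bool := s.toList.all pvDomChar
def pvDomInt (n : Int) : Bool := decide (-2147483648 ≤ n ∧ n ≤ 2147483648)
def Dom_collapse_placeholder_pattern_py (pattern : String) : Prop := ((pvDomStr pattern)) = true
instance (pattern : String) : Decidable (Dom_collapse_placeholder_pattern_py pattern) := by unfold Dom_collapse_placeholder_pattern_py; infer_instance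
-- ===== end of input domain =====

-- B replaces A's split/loop/join over segments by one character pass keeping the clean prefix through the last slash (alternative decomposition, same cost).

-- ===== PORT A =====
-- the 'for part in parts: … break' loop of A (collects parts until one contains '<' or '*')
def pvALoop : List (List Char) → List (List Char)
  | [] => []
  | p :: ps =>
    if PySem.Chars.isIn ['<'] p || PySem.Chars.isIn ['*'] p then []
    else p :: pvALoop ps

def collapse_placeholder_pattern_py (pattern : String) : Option String :=
  let parts := PySem.Chars.splitOn pattern.toList ['/']
  let clean_parts := pvALoop parts
  if clean_parts ≠ [] then some (String.mk (PySem.Chars.join ['/'] clean_parts ++ ['/']))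
  else none

-- ===== PORT B =====
-- Source B's loop: keep = clean prefix through the last '/', acc = chars since then.
-- (pattern's slicing never occurs in B; list/string concatenations are exact.)
def pvBLoop : List Char → Option (List Char) → List Char → Option (List Char)
  | [], keep, acc => some (keep.getD [] ++ acc ++ ['/'])
  | c :: rest, keep, acc =>
    if c = '<' ∨ c = '*' then keep
    else if c = '/' then pvBLoop rest (some (keep.getD [] ++ (acc ++ [c]))) []
    else pvBLoop rest keep (acc ++ [c])

def collapse_placeholder_pattern_py_alt (pattern : String) : Option String :=
  (pvBLoop pattern.toList none []).map String.mk

-- ===== PRECONDITION & SPEC =====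
def Spec_collapse_placeholder_pattern_py (pattern : String) (out : Option String) : Prop := out = collapse_placeholder_pattern_py_alt pattern
instance (pattern : String) (out : Option String) : Decidable (Spec_collapse_placeholder_pattern_py pattern out) := by unfold Spec_collapse_placeholder_pattern_py; infer_instance

-- ===== CLAIM (what is proved, stated in full; the proofs are below) =====
def Claim_equal_collapse_placeholder_pattern_py : Prop := ∀ (pattern : String), Dom_collapse_placeholder_pattern_py pattern → Spec_collapse_placeholder_pattern_py pattern (collapse_placeholder_pattern_py pattern)

-- ===== LEMMAS AND PROOFS =====

-- structural characterisation of splitting on a single '/'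
def pvSplit : List Char → List (List Char)
  | [] => [[]]
  | c :: rest => if c = '/' then [] :: pvSplit rest else (pvSplit rest).modifyHead (c :: ·)

theorem pvSplit_ne_nil (cs : List Char) : pvSplit cs ≠ [] := by
  cases cs with
  | nil => simp [pvSplit]
  | cons c rest =>
    simp only [pvSplit]
    split_ifs <;> simp [List.modifyHead_eq_nil_iff, pvSplit_ne_nil rest]

theorem pvSplitOn_go_eq (l : List Char) : ∀ (fuel : Nat), l.length ≤ fuel →
    ∀ (cur : List Char) (acc : List (List Char)),
    PySem.Chars.splitOn.go ['/'] fuel l cur acc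
      = acc.reverse ++ (pvSplit l).modifyHead (cur.reverse ++ ·) := by
  induction l with
  | nil =>
    intro fuel _ cur acc
    cases fuel <;> simp [PySem.Chars.splitOn.go, pvSplit]
  | cons c rest ih =>
    intro fuel hf cur acc
    match fuel, hf with
    | fuel + 1, hf =>
      have hf' : rest.length ≤ fuel := by simpa using hf
      by_cases hc : c = '/'
      · subst hc
        simp only [PySem.Chars.splitOn.go, List.isPrefixOf, BEq.rfl, Bool.true_and, if_pos]
        rw [show List.drop ['/'].length ('/' :: rest) = rest from rfl,
          ih fuel hf' [] (cur.reverse :: acc)]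
        rcases h : pvSplit rest with _ | ⟨p, ps⟩
        · exact absurd h (pvSplit_ne_nil rest)
        · simp [pvSplit, h]
      · have hpre : ['/'].isPrefixOf (c :: rest) = false := by
          simp [List.isPrefixOf]; exact fun h => (hc h.symm).elim
        simp only [PySem.Chars.splitOn.go, hpre, Bool.false_eq_true, if_false]
        rw [ih fuel hf' (c :: cur) acc]
        rcases hsp : pvSplit rest with _ | ⟨p, ps⟩
        · exact absurd hsp (pvSplit_ne_nil rest)
        · simp [pvSplit, hc, hsp]
  termination_by l.length

theorem pvSplitOn_eq (cs : List Char) : PySem.Chars.splitOn cs ['/'] = pvSplit cs := by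
  unfold PySem.Chars.splitOn
  rw [pvSplitOn_go_eq cs (cs.length + 1) (Nat.le_succ _) [] []]
  rcases pvSplit cs with _ | ⟨p, ps⟩ <;> simp

theorem pv_isIn_singleton (a : Char) (l : List Char) :
    PySem.Chars.isIn [a] l = decide (a ∈ l) := by
  by_cases h : a ∈ l
  · rw [(PySem.Chars.isIn_iff_infix _ _).mpr ((List.singleton_infix_iff _ _).mpr h)]
    simp [h]
  · rw [(PySem.Chars.isIn_eq_false_iff _ _).mpr (by simpa [List.singleton_infix_iff] using h)]
    simp [h]

-- the joint result of A's loop over pvSplit, as one structural function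
def pvG : List Char → Option (List Char)
  | [] => some ['/']
  | c :: rest =>
    if c = '<' ∨ c = '*' then none
    else if c = '/' then some ('/' :: (pvG rest).getD [])
    else (pvG rest).map (c :: ·)

theorem pvALoop_split (cs : List Char) :
    pvALoop (pvSplit cs) =
      match cs with
      | [] => [[]]
      | c :: rest =>
        if c = '<' ∨ c = '*' then []
        else if c = '/' then [] :: pvALoop (pvSplit rest)
        else (pvALoop (pvSplit rest)).modifyHead (c :: ·) := by
  cases cs with
  | nil => simp [pvSplit, pvALoop, pv_isIn_singleton]
  | cons c rest =>
    by_cases hslash : c = '/'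
    · have hph : ¬(c = '<' ∨ c = '*') := by subst hslash; simp
      simp [pvSplit, hslash, hph, pvALoop, pv_isIn_singleton]
    · rcases hsp : pvSplit rest with _ | ⟨p, ps⟩
      · exact absurd hsp (pvSplit_ne_nil rest)
      · by_cases hph : c = '<' ∨ c = '*'
        · have hmem : '<' ∈ c :: p ∨ '*' ∈ c :: p := by
            rcases hph with h | h <;> subst h <;> simp
          simp only [pvSplit, hslash, if_false, hsp, List.modifyHead_cons, pvALoop,
            pv_isIn_singleton, hph, if_true]
          simp only [decide_eq_true_eq, Bool.or_eq_true, List.mem_cons] at *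
          simp only [if_pos (by tauto : ('<' = c ∨ '<' ∈ p) ∨ '*' = c ∨ '*' ∈ p)]
        · have hne : ¬c = '<' ∧ ¬c = '*' := by tauto
          by_cases hp : '<' ∈ p ∨ '*' ∈ p
          · have h2 : '<' ∈ c :: p ∨ '*' ∈ c :: p := by
              rcases hp with h | h <;> simp [h]
            simp only [pvSplit, hslash, if_false, hsp, List.modifyHead_cons, pvALoop,
              pv_isIn_singleton, hph, if_false]
            simp only [decide_eq_true_eq, Bool.or_eq_true, List.mem_cons] at *
            rw [if_pos (by tauto : ('<' = c ∨ '<' ∈ p) ∨ '*' = c ∨ '*' ∈ p),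
              if_pos hp]
            simp
          · have h2 : ¬('<' ∈ c :: p ∨ '*' ∈ c :: p) := by
              simp only [List.mem_cons]
              rintro ((h | h) | (h | h))
              · exact hne.1 h.symm
              · exact hp (Or.inl h)
              · exact hne.2 h.symm
              · exact hp (Or.inr h)
            simp only [pvSplit, hslash, if_false, hsp, List.modifyHead_cons, pvALoop,
              pv_isIn_singleton, hph, if_false]
            simp only [decide_eq_true_eq, Bool.or_eq_true, List.mem_cons] at *
            rw [if_neg (by tauto : ¬(('<' = c ∨ '<' ∈ p) ∨ '*' = c ∨ '*' ∈ p)),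
              if_neg hp]
            simp

theorem pv_join_cons_head (c : Char) (p : List Char) (ps : List (List Char)) :
    PySem.Chars.join ['/'] ((c :: p) :: ps) = c :: PySem.Chars.join ['/'] (p :: ps) := by
  cases ps <;> simp [PySem.Chars.join, List.intercalate]

-- A's result equals pvG
theorem pvA_eq_pvG (cs : List Char) :
    (if pvALoop (pvSplit cs) ≠ [] then
        some (PySem.Chars.join ['/'] (pvALoop (pvSplit cs)) ++ ['/'])
      else none) = pvG cs := by
  induction cs with
  | nil => simp [pvSplit, pvALoop, pvG, pv_isIn_singleton, PySem.Chars.join, List.intercalate]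
  | cons c rest ih =>
    rw [pvALoop_split]
    by_cases hph : c = '<' ∨ c = '*'
    · simp [pvG, hph]
    · by_cases hslash : c = '/'
      · subst hslash
        simp only [hph, if_false, if_true, pvG]
        rw [← ih]
        rcases hA : pvALoop (pvSplit rest) with _ | ⟨p, ps⟩
        · simp [hA, PySem.Chars.join, List.intercalate]
        · have hj : PySem.Chars.join ['/'] ([] :: p :: ps)
              = '/' :: PySem.Chars.join ['/'] (p :: ps) := by
            simp [PySem.Chars.join, List.intercalate]
          simp [hA, hj]
      · simp only [hph, if_false, hslash, if_false, pvG]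
        rw [← ih]
        rcases hA : pvALoop (pvSplit rest) with _ | ⟨p, ps⟩
        · simp [hA]
        · simp [hA, pv_join_cons_head]

-- B's loop in terms of pvG
theorem pvBLoop_eq_pvG (cs : List Char) :
    ∀ (keep : Option (List Char)) (acc : List Char),
    pvBLoop cs keep acc =
      match pvG cs with
      | none => keep
      | some p => some (keep.getD [] ++ acc ++ p) := by
  induction cs with
  | nil => intro keep acc; simp [pvBLoop, pvG]
  | cons c rest ih =>
    intro keep acc
    by_cases hph : c = '<' ∨ c = '*'
    · simp [pvBLoop, pvG, hph]
    · by_cases hslash : c = '/'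
      · subst hslash
        simp only [pvBLoop, hph, if_false, if_true, pvG, ih]
        rcases pvG rest with _ | p <;> simp
      · simp only [pvBLoop, hph, if_false, hslash, if_true, pvG, ih]
        rcases pvG rest with _ | p <;> simp

-- ===== VERDICT (by name: the statement is the Claim_ definition above) =====
theorem collapse_placeholder_pattern_py_spec : Claim_equal_collapse_placeholder_pattern_py := by
  intro pattern _
  unfold Spec_collapse_placeholder_pattern_py
  unfold collapse_placeholder_pattern_py collapse_placeholder_pattern_py_alt
  rw [pvSplitOn_eq, pvBLoop_eq_pvG]
  rw [← pvA_eq_pvG pattern.toList]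
  rcases h : pvALoop (pvSplit pattern.toList) with _ | ⟨p, ps⟩ <;> simp [h]
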